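-- pv_equiv track=rewrite | github.com/hariharan2004/backend-asset | result.py | calculate_final_signal
-- ===== SOURCE A (Python) =====
-- def calculate_final_signal(bollinger_signal, ma_signal, supresis_signal, fib_signals):
--     fib_signal = set(fib_signals)  # Use set to eliminate duplicates
--
--     if bollinger_signal == "buy" and ma_signal == "buy" and supresis_signal == "buy" and all(sig == "buy" for sig in fib_signal):
--         return "Strong Buy"
--     elif bollinger_signal == "sell" and ma_signal == "sell" and supresis_signal == "sell" and all(sig == "sell" for sig in fib_signal):
--         return "Strong Sell"
--     elif (bollinger_signal == "buy" or ma_signal == "buy" or supresis_signal == "buy" or any(sig == "buy" for sig in fib_signal)):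
--         return "Buy"
--     elif (bollinger_signal == "sell" or ma_signal == "sell" or supresis_signal == "sell" or any(sig == "sell" for sig in fib_signal)):
--         return "Sell"
--     else:
--         return "Hold"
-- ===== SOURCE B (Python) =====
-- def calculate_final_signal(bollinger_signal, ma_signal, supresis_signal, fib_signals):
--     # Encode each signal numerically (buy=+1, sell=-1, other=0) and decide
--     # from the extremes of the encoded values: min==1 means all-buy,
--     # max==-1 means all-sell, max==1 means some buy, min==-1 means some sell.
--     score = {"buy": 1, "sell": -1}
--     vals = [score.get(x, 0) for x in (bollinger_signal, ma_signal, supresis_signal, *fib_signals)]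
--     hi, lo = max(vals), min(vals)
--     if lo == 1:
--         return "Strong Buy"
--     if hi == -1:
--         return "Strong Sell"
--     if hi == 1:
--         return "Buy"
--     if lo == -1:
--         return "Sell"
--     return "Hold"
-- ===== Notes on version B (the rewrite author's own statement) =====
-- stated objective: alternative
-- what changed: Encodes each signal as an integer score (buy=+1, sell=-1, other=0) and decides from the min/max of the encoded list instead of A's chained compound booleans with all/any scans.
import Mathlib
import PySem

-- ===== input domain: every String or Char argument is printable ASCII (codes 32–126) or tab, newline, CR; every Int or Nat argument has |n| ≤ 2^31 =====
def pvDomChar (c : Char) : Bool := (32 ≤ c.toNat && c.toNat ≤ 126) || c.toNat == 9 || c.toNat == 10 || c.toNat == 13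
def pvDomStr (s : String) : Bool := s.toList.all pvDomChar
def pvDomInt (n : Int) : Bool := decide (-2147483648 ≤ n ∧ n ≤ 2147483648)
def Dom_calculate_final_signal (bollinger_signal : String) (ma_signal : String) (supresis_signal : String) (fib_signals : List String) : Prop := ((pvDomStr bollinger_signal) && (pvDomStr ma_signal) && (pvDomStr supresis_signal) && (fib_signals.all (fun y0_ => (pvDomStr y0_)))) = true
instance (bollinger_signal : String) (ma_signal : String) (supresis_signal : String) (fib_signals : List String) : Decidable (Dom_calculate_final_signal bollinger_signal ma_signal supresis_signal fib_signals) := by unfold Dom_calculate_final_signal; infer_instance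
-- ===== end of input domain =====

-- B re-decides via a numeric encoding (buy=+1, sell=-1, other=0) and the min/max of the encoded signals instead of A's chained compound booleans with all/any scans (alternative algorithm, same cost).


-- ===== PORT A =====
def calculate_final_signal (bollinger_signal : String) (ma_signal : String) (supresis_signal : String) (fib_signals : List String) : String :=
  let fib_signal : PySem.Set String := PySem.Set.ofList fib_signals
  if bollinger_signal == "buy" && ma_signal == "buy" && supresis_signal == "buy" && fib_signal.all (fun sig => sig == "buy") then "Strong Buy"
  else if bollinger_signal == "sell" && ma_signal == "sell" && supresis_signal == "sell" && fib_signal.all (fun sig => sig == "sell") then "Strong Sell"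
  else if bollinger_signal == "buy" || ma_signal == "buy" || supresis_signal == "buy" || fib_signal.any (fun sig => sig == "buy") then "Buy"
  else if bollinger_signal == "sell" || ma_signal == "sell" || supresis_signal == "sell" || fib_signal.any (fun sig => sig == "sell") then "Sell"
  else "Hold"

-- ===== PORT B =====
-- score.get(x, 0) of Source B's two-entry dict, written as the direct conditional
def pvScore (x : String) : Int := if x == "buy" then 1 else if x == "sell" then -1 else 0

def calculate_final_signal_alt (bollinger_signal : String) (ma_signal : String) (supresis_signal : String) (fib_signals : List String) : String :=
  let vals : List Int := (bollinger_signal :: ma_signal :: supresis_signal :: fib_signals).map pvScore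
  -- Python max/min over the (always non-empty) list: fold from the head
  let hi : Int := match vals with | [] => 0 | v :: vs => vs.foldl max v
  let lo : Int := match vals with | [] => 0 | v :: vs => vs.foldl min v
  if lo == 1 then "Strong Buy"
  else if hi == -1 then "Strong Sell"
  else if hi == 1 then "Buy"
  else if lo == -1 then "Sell"
  else "Hold"

-- ===== PRECONDITION & SPEC =====
def Spec_calculate_final_signal (bollinger_signal : String) (ma_signal : String) (supresis_signal : String) (fib_signals : List String) (out : String) : Prop := out = calculate_final_signal_alt bollinger_signal ma_signal supresis_signal fib_signals
instance (bollinger_signal : String) (ma_signal : String) (supresis_signal : String) (fib_signals : List String) (out : String) : Decidable (Spec_calculate_final_signal bollinger_signal ma_signal supresis_signal fib_signals out) := by unfold Spec_calculate_final_signal; infer_instance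

-- ===== CLAIM (what is proved, stated in full; the proofs are below) =====
def Claim_equal_calculate_final_signal : Prop := ∀ (bollinger_signal : String) (ma_signal : String) (supresis_signal : String) (fib_signals : List String), Dom_calculate_final_signal bollinger_signal ma_signal supresis_signal fib_signals → Spec_calculate_final_signal bollinger_signal ma_signal supresis_signal fib_signals (calculate_final_signal bollinger_signal ma_signal supresis_signal fib_signals)

-- ===== LEMMAS AND PROOFS =====

lemma pvScore_le_one (x : String) : pvScore x ≤ 1 := by
  unfold pvScore; split_ifs <;> omega

lemma neg_one_le_pvScore (x : String) : -1 ≤ pvScore x := by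
  unfold pvScore; split_ifs <;> omega

lemma pvScore_eq_one (x : String) : pvScore x = 1 ↔ x = "buy" := by
  unfold pvScore; split_ifs with h1 h2 <;> simp_all

lemma pvScore_eq_neg_one (x : String) : pvScore x = -1 ↔ x = "sell" := by
  unfold pvScore; split_ifs with h1 h2 <;> simp_all

lemma foldl_max_eq_one (l : List Int) (a : Int) (ha : a ≤ 1) (hl : ∀ x ∈ l, x ≤ 1) :
    l.foldl max a = 1 ↔ a = 1 ∨ ∃ x ∈ l, x = 1 := by
  induction l generalizing a with
  | nil => simp
  | cons x t ih =>
    have hx : x ≤ 1 := hl x (by simp)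
    have hm : max a x = 1 ↔ a = 1 ∨ x = 1 := by omega
    rw [List.foldl_cons, ih (max a x) (by omega) (fun y hy => hl y (by simp [hy]))]
    simp only [List.mem_cons]
    rw [hm]
    constructor
    · rintro ((h|h) | ⟨y,hy,h⟩)
      · exact Or.inl h
      · exact Or.inr ⟨x, Or.inl rfl, h⟩
      · exact Or.inr ⟨y, Or.inr hy, h⟩
    · rintro (h | ⟨y,(h2|h2),h⟩)
      · exact Or.inl (Or.inl h)
      · exact Or.inl (Or.inr (h2 ▸ h))
      · exact Or.inr ⟨y, h2, h⟩

lemma foldl_min_eq_neg_one (l : List Int) (a : Int) (ha : -1 ≤ a) (hl : ∀ x ∈ l, -1 ≤ x) :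
    l.foldl min a = -1 ↔ a = -1 ∨ ∃ x ∈ l, x = -1 := by
  induction l generalizing a with
  | nil => simp
  | cons x t ih =>
    have hx : -1 ≤ x := hl x (by simp)
    have hm : min a x = -1 ↔ a = -1 ∨ x = -1 := by omega
    rw [List.foldl_cons, ih (min a x) (by omega) (fun y hy => hl y (by simp [hy]))]
    simp only [List.mem_cons]
    rw [hm]
    constructor
    · rintro ((h|h) | ⟨y,hy,h⟩)
      · exact Or.inl h
      · exact Or.inr ⟨x, Or.inl rfl, h⟩
      · exact Or.inr ⟨y, Or.inr hy, h⟩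
    · rintro (h | ⟨y,(h2|h2),h⟩)
      · exact Or.inl (Or.inl h)
      · exact Or.inl (Or.inr (h2 ▸ h))
      · exact Or.inr ⟨y, h2, h⟩

lemma foldl_min_eq_one (l : List Int) (a : Int) (ha : a ≤ 1) (hl : ∀ x ∈ l, x ≤ 1) :
    l.foldl min a = 1 ↔ a = 1 ∧ ∀ x ∈ l, x = 1 := by
  induction l generalizing a with
  | nil => simp
  | cons x t ih =>
    have hx : x ≤ 1 := hl x (by simp)
    have hm : min a x = 1 ↔ a = 1 ∧ x = 1 := by omega
    rw [List.foldl_cons, ih (min a x) (by omega) (fun y hy => hl y (by simp [hy]))]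
    simp only [List.mem_cons]
    rw [hm]
    constructor
    · rintro ⟨⟨h1,h2⟩,hall⟩
      exact ⟨h1, fun y hy => hy.elim (fun e => e ▸ h2) (hall y)⟩
    · rintro ⟨h1, hall⟩
      exact ⟨⟨h1, hall x (Or.inl rfl)⟩, fun y hy => hall y (Or.inr hy)⟩

lemma foldl_max_eq_neg_one (l : List Int) (a : Int) (ha : -1 ≤ a) (hl : ∀ x ∈ l, -1 ≤ x) :
    l.foldl max a = -1 ↔ a = -1 ∧ ∀ x ∈ l, x = -1 := by
  induction l generalizing a with
  | nil => simp
  | cons x t ih =>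
    have hx : -1 ≤ x := hl x (by simp)
    have hm : max a x = -1 ↔ a = -1 ∧ x = -1 := by omega
    rw [List.foldl_cons, ih (max a x) (by omega) (fun y hy => hl y (by simp [hy]))]
    simp only [List.mem_cons]
    rw [hm]
    constructor
    · rintro ⟨⟨h1,h2⟩,hall⟩
      exact ⟨h1, fun y hy => hy.elim (fun e => e ▸ h2) (hall y)⟩
    · rintro ⟨h1, hall⟩
      exact ⟨⟨h1, hall x (Or.inl rfl)⟩, fun y hy => hall y (Or.inr hy)⟩

lemma score_bound_le (l : List String) : ∀ x ∈ l.map pvScore, x ≤ 1 := by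
  intro x hx; obtain ⟨y, _, rfl⟩ := List.mem_map.1 hx; exact pvScore_le_one y

lemma score_bound_ge (l : List String) : ∀ x ∈ l.map pvScore, -1 ≤ x := by
  intro x hx; obtain ⟨y, _, rfl⟩ := List.mem_map.1 hx; exact neg_one_le_pvScore y

-- the four branch conditions, one by one

lemma cond_strong_buy (b m s : String) (fib : List String) :
    (b == "buy" && m == "buy" && s == "buy" && (PySem.Set.ofList fib).all (fun sig => sig == "buy"))
      = (((m :: s :: fib).map pvScore).foldl min (pvScore b) == 1) := by
  rw [Bool.eq_iff_iff, beq_iff_eq, foldl_min_eq_one _ _ (pvScore_le_one b) (score_bound_le _)]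
  simp only [Bool.and_eq_true, beq_iff_eq, List.map_cons, List.mem_cons, List.mem_map,
    pvScore_eq_one, List.all_eq_true, PySem.Set.mem_ofList]
  constructor
  · rintro ⟨⟨⟨hb, hm⟩, hs⟩, hf⟩
    refine ⟨hb, ?_⟩
    rintro x (h|h|⟨y,hy,h⟩)
    · exact h ▸ (pvScore_eq_one m).2 hm
    · exact h ▸ (pvScore_eq_one s).2 hs
    · exact h ▸ (pvScore_eq_one y).2 (by simpa using hf y hy)
  · rintro ⟨hb, hall⟩
    refine ⟨⟨⟨hb, ?_⟩, ?_⟩, ?_⟩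
    · exact (pvScore_eq_one m).1 (hall _ (Or.inl rfl))
    · exact (pvScore_eq_one s).1 (hall _ (Or.inr (Or.inl rfl)))
    · intro y hy
      simpa using (pvScore_eq_one y).1 (hall _ (Or.inr (Or.inr ⟨y, hy, rfl⟩)))

lemma cond_strong_sell (b m s : String) (fib : List String) :
    (b == "sell" && m == "sell" && s == "sell" && (PySem.Set.ofList fib).all (fun sig => sig == "sell"))
      = (((m :: s :: fib).map pvScore).foldl max (pvScore b) == -1) := by
  rw [Bool.eq_iff_iff, beq_iff_eq, foldl_max_eq_neg_one _ _ (neg_one_le_pvScore b) (score_bound_ge _)]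
  simp only [Bool.and_eq_true, beq_iff_eq, List.map_cons, List.mem_cons, List.mem_map,
    pvScore_eq_neg_one, List.all_eq_true, PySem.Set.mem_ofList]
  constructor
  · rintro ⟨⟨⟨hb, hm⟩, hs⟩, hf⟩
    refine ⟨hb, ?_⟩
    rintro x (h|h|⟨y,hy,h⟩)
    · exact h ▸ (pvScore_eq_neg_one m).2 hm
    · exact h ▸ (pvScore_eq_neg_one s).2 hs
    · exact h ▸ (pvScore_eq_neg_one y).2 (by simpa using hf y hy)
  · rintro ⟨hb, hall⟩
    refine ⟨⟨⟨hb, ?_⟩, ?_⟩, ?_⟩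
    · exact (pvScore_eq_neg_one m).1 (hall _ (Or.inl rfl))
    · exact (pvScore_eq_neg_one s).1 (hall _ (Or.inr (Or.inl rfl)))
    · intro y hy
      simpa using (pvScore_eq_neg_one y).1 (hall _ (Or.inr (Or.inr ⟨y, hy, rfl⟩)))

lemma cond_buy (b m s : String) (fib : List String) :
    (b == "buy" || m == "buy" || s == "buy" || (PySem.Set.ofList fib).any (fun sig => sig == "buy"))
      = (((m :: s :: fib).map pvScore).foldl max (pvScore b) == 1) := by
  rw [Bool.eq_iff_iff, beq_iff_eq, foldl_max_eq_one _ _ (pvScore_le_one b) (score_bound_le _)]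
  simp only [Bool.or_eq_true, beq_iff_eq, List.map_cons, List.mem_cons, List.mem_map,
    pvScore_eq_one, List.any_eq_true, PySem.Set.mem_ofList]
  constructor
  · rintro (((hb | hm) | hs) | ⟨y, hy, hv⟩)
    · exact Or.inl hb
    · exact Or.inr ⟨pvScore m, Or.inl rfl, (pvScore_eq_one m).2 hm⟩
    · exact Or.inr ⟨pvScore s, Or.inr (Or.inl rfl), (pvScore_eq_one s).2 hs⟩
    · exact Or.inr ⟨pvScore y, Or.inr (Or.inr ⟨y, hy, rfl⟩), (pvScore_eq_one y).2 (by simpa using hv)⟩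
  · rintro (hb | ⟨x, (h|h|⟨y,hy,h⟩), hx⟩)
    · exact Or.inl (Or.inl (Or.inl hb))
    · exact Or.inl (Or.inl (Or.inr ((pvScore_eq_one m).1 (h ▸ hx))))
    · exact Or.inl (Or.inr ((pvScore_eq_one s).1 (h ▸ hx)))
    · exact Or.inr ⟨y, hy, by simpa using (pvScore_eq_one y).1 (h ▸ hx)⟩

lemma cond_sell (b m s : String) (fib : List String) :
    (b == "sell" || m == "sell" || s == "sell" || (PySem.Set.ofList fib).any (fun sig => sig == "sell"))
      = (((m :: s :: fib).map pvScore).foldl min (pvScore b) == -1) := by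
  rw [Bool.eq_iff_iff, beq_iff_eq, foldl_min_eq_neg_one _ _ (neg_one_le_pvScore b) (score_bound_ge _)]
  simp only [Bool.or_eq_true, beq_iff_eq, List.map_cons, List.mem_cons, List.mem_map,
    pvScore_eq_neg_one, List.any_eq_true, PySem.Set.mem_ofList]
  constructor
  · rintro (((hb | hm) | hs) | ⟨y, hy, hv⟩)
    · exact Or.inl hb
    · exact Or.inr ⟨pvScore m, Or.inl rfl, (pvScore_eq_neg_one m).2 hm⟩
    · exact Or.inr ⟨pvScore s, Or.inr (Or.inl rfl), (pvScore_eq_neg_one s).2 hs⟩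
    · exact Or.inr ⟨pvScore y, Or.inr (Or.inr ⟨y, hy, rfl⟩), (pvScore_eq_neg_one y).2 (by simpa using hv)⟩
  · rintro (hb | ⟨x, (h|h|⟨y,hy,h⟩), hx⟩)
    · exact Or.inl (Or.inl (Or.inl hb))
    · exact Or.inl (Or.inl (Or.inr ((pvScore_eq_neg_one m).1 (h ▸ hx))))
    · exact Or.inl (Or.inr ((pvScore_eq_neg_one s).1 (h ▸ hx)))
    · exact Or.inr ⟨y, hy, by simpa using (pvScore_eq_neg_one y).1 (h ▸ hx)⟩

-- ===== VERDICT (by name: the statement is the Claim_ definition above) =====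
theorem calculate_final_signal_spec : Claim_equal_calculate_final_signal := by
  intro b m s fib _
  unfold Spec_calculate_final_signal calculate_final_signal calculate_final_signal_alt
  simp only [List.map_cons, cond_strong_buy, cond_strong_sell, cond_buy, cond_sell]
  rfl
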